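-- pv_equiv track=rewrite | github.com/orbcode/orbuculum | sump2/sump2.py | get_bit_value
-- ===== SOURCE A (Python) =====
-- def get_bit_value( data_line,header_line,bus_widths_list_cp ):
--   """
--   Figure out each bit value (0,1) for the provided line. Return a list of 0,1s
--   """
--   rts = [];
--   data_list = data_line.split();
--   for bus_name in header_line.split()[0:-1]:# Remove the timescale at very end
--     bus_width = bus_widths_list_cp.pop(0); # 1 or 16, etc
--     data      = data_list.pop(0);         # "1" or "10ab", etc
--     bit_val = 2**(bus_width-1);           # 8->128, 4->8, 1->1
--     for i in range( bus_width ):          # Counts 0..7  for 8bit bus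
--       try:
--         if ( ( int(data,16) & bit_val ) == 0 ): rts += ["0"];
--         else:                                   rts += ["1"];
--       except:
--         rts += ["x"];
--
--       bit_val //= 2;                      # Counts 128,64,..2,1 for 8bit bus
--   return rts;
-- ===== SOURCE B (Python) =====
-- def get_bit_value(data_line, header_line, bus_widths_list_cp):
--     """
--     Figure out each bit value (0,1) for the provided line. Return a list of 0,1s
--     """
--     rts = []
--     n = len(header_line.split()) - 1
--     for data in data_line.split()[:max(n, 0)]:
--         w = bus_widths_list_cp.pop(0)
--         if w <= 0:
--             continue
--         try:
--             val = int(data, 16)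
--         except ValueError:
--             rts.extend('x' * w)
--         else:
--             rts.extend(format(val & ((1 << w) - 1), '0{}b'.format(w)))
--     return rts
-- ===== Notes on version B (the rewrite author's own statement) =====
-- stated objective: idiomatic
-- what changed: B parses each hex token once and emits its field as one masked, zero-padded base-2 string read MSB-first, instead of A's per-bit descending-mask loop that re-parses the token on every bit.
import Mathlib
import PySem

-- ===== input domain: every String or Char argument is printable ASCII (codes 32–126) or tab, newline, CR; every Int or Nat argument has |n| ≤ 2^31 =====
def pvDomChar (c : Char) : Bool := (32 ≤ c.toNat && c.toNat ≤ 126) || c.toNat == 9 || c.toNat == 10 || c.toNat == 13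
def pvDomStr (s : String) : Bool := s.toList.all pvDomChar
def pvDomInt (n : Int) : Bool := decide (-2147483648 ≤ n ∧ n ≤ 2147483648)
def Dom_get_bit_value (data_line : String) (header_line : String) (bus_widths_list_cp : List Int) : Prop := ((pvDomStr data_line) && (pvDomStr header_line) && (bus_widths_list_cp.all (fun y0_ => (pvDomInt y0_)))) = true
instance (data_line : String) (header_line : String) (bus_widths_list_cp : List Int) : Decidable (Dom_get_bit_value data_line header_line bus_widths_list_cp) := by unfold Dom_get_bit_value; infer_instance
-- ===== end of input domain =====

-- B replaces A's per-bit descending-mask loop (which re-parses the hex token on every bit) by a single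
-- parse, a mask to the field width and one binary-string conversion read MSB-first (objective: idiomatic).
-- A pops from bus_widths_list_cp in place; B performs the same pops; the equivalence proved here is about
-- the return value.

-- ===== PORT A =====
-- inner body of one 'for i in range(bus_width)' iteration: try int(data,16)&bit_val, except -> "x"
def pvBodyA (d : String) (rts : List String) (bv : Int) : List String :=
  match PySem.Int.ofStrBase? d 16 with
  | some v => if PySem.Int.band v bv = 0 then rts ++ ["0"] else rts ++ ["1"]
  | none => rts ++ ["x"]

def get_bit_value (data_line : String) (header_line : String) (bus_widths_list_cp : List Int) : List String :=
  let data_list := PySem.Str.split₀ data_line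
  let headers := PySem.List.slice (PySem.Str.split₀ header_line) (some 0) (some (-1))
  (headers.foldl (fun (st : List Int × List String × List String) _bus_name =>
      match st with
      | (bw :: bws', d :: ds', rts) =>
        -- Python: bit_val = 2**(bus_width-1); for bus_width ≤ 0 this is an unused float, the inner
        -- range is empty; we represent it by 2^(bw-1).toNat, unused in that case.
        let bit_val : Int := (2:Int) ^ (bw - 1).toNat
        let inner := (PySem.List.pyRange 0 bw 1).foldl (fun (st2 : List String × Int) _i =>
            (pvBodyA d st2.1 st2.2, PySem.Int.floordiv st2.2 2)) (rts, bit_val)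
        (bws', ds', inner.1)
      | (bws, ds, rts) => (bws, ds, rts)   -- list.pop(0) from an empty list: IndexError, excluded by Pre_
      ) (bus_widths_list_cp, data_list, [])).2.2

-- ===== PORT B =====
-- one field of B: [] wide 'x's on a parse failure, else the zero-padded binary string of the masked value
def pvFieldB (w : Int) (data : String) : List String :=
  match PySem.Int.ofStrBase? data 16 with
  | none => List.replicate w.toNat "x"
  | some val =>
    let digs := PySem.Int.toBinChars (PySem.Int.band val (((1 : Int) <<< w.toNat) - 1))
    -- format(masked, '0{w}b'): zero-pad the (nonnegative) binary digits to width w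
    (List.replicate (w.toNat - digs.length) '0' ++ digs).map (fun c => String.ofList [c])

def get_bit_value_alt (data_line : String) (header_line : String) (bus_widths_list_cp : List Int) : List String :=
  let n : Int := ((PySem.Str.split₀ header_line).length : Int) - 1
  let fields := PySem.List.slice (PySem.Str.split₀ data_line) none (some (max n 0))
  (fields.foldl (fun (st : List String × List Int) data =>
      match st with
      | (rts, w :: bws') =>
        if w ≤ 0 then (rts, bws') else (rts ++ pvFieldB w data, bws')
      | (rts, []) => (rts, [])   -- bus_widths_list_cp.pop(0) raises: excluded by Pre_
      ) ([], bus_widths_list_cp)).1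

-- ===== PRECONDITION & SPEC =====
-- Pre_ excludes exactly the inputs on which A raises IndexError: fewer bus widths or data tokens
-- than header fields (minus the trailing timescale).
def Pre_get_bit_value (data_line : String) (header_line : String) (bus_widths_list_cp : List Int) : Prop :=
  (PySem.Str.split₀ header_line).length - 1 ≤ bus_widths_list_cp.length ∧
  (PySem.Str.split₀ header_line).length - 1 ≤ (PySem.Str.split₀ data_line).length
instance (data_line : String) (header_line : String) (bus_widths_list_cp : List Int) : Decidable (Pre_get_bit_value data_line header_line bus_widths_list_cp) := by unfold Pre_get_bit_value; infer_instance

def pvWitness_get_bit_value : String × String × List Int := ("1a x", "bus t", [5])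

def Spec_get_bit_value (data_line : String) (header_line : String) (bus_widths_list_cp : List Int) (out : List String) : Prop := out = get_bit_value_alt data_line header_line bus_widths_list_cp
instance (data_line : String) (header_line : String) (bus_widths_list_cp : List Int) (out : List String) : Decidable (Spec_get_bit_value data_line header_line bus_widths_list_cp out) := by unfold Spec_get_bit_value; infer_instance

-- ===== CLAIM (what is proved, stated in full; the proofs are below) =====
def Claim_equal_get_bit_value : Prop := ∀ (data_line : String) (header_line : String) (bus_widths_list_cp : List Int), Dom_get_bit_value data_line header_line bus_widths_list_cp → Pre_get_bit_value data_line header_line bus_widths_list_cp → Spec_get_bit_value data_line header_line bus_widths_list_cp (get_bit_value data_line header_line bus_widths_list_cp)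

-- ===== LEMMAS AND PROOFS =====

-- binary digits of a natural number, MSB first (proof-side model of Nat.toDigits 2)
def pvBits : Nat → List Char
  | 0 => ['0']
  | 1 => ['1']
  | m + 2 => pvBits ((m + 2) / 2) ++ [Nat.digitChar ((m + 2) % 2)]
  decreasing_by omega

theorem pvToDigitsCore_eq (fuel : Nat) : ∀ (n : Nat) (ds : List Char), n < fuel →
    Nat.toDigitsCore 2 fuel n ds = pvBits n ++ ds := by
  induction fuel with
  | zero => omega
  | succ fuel ih =>
    intro n ds h
    rw [Nat.toDigitsCore]
    by_cases h2 : n / 2 = 0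
    · have hn : n = 0 ∨ n = 1 := by omega
      rcases hn with rfl | rfl <;> simp [h2, pvBits, Nat.digitChar]
    · have hn : 2 ≤ n := by omega
      simp only [h2, if_false]
      rw [ih (n / 2) _ (by omega)]
      obtain ⟨m, rfl⟩ : ∃ m, n = m + 2 := ⟨n - 2, by omega⟩
      rw [pvBits]
      simp

theorem pvToDigits_eq (n : Nat) : Nat.toDigits 2 n = pvBits n := by
  rw [Nat.toDigits, pvToDigitsCore_eq (n + 1) n [] (by omega)]
  simp

theorem pvBits_len_le (w : Nat) : ∀ m, m < 2 ^ w → 0 < w → (pvBits m).length ≤ w := by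
  induction w with
  | zero => omega
  | succ w ih =>
    intro m hm _
    match m with
    | 0 => simp [pvBits]
    | 1 => simp [pvBits]
    | m + 2 =>
      rw [pvBits]
      have hw : 0 < w := by
        by_contra h
        have : w = 0 := by omega
        subst this; norm_num at hm; omega
      have := ih ((m + 2) / 2) (by omega) hw
      simp only [List.length_append, List.length_cons, List.length_nil]
      omega

theorem pvBits_pad (w : Nat) : 0 < w → ∀ m, m < 2 ^ w →
    List.replicate (w - (pvBits m).length) '0' ++ pvBits m
      = (List.range w).map (fun i => if m.testBit (w - 1 - i) then '1' else '0') := by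
  induction w with
  | zero => omega
  | succ w ih =>
    intro _ m hm
    by_cases hw0 : w = 0
    · subst hw0
      norm_num at hm
      interval_cases m <;> simp [pvBits]
    · have hw : 0 < w := by omega
      have hm2 : m / 2 < 2 ^ w := by
        have : 2 ^ (w + 1) = 2 ^ w * 2 := by ring
        omega
      have hrhs : (List.range (w + 1)).map
            (fun i => if m.testBit (w + 1 - 1 - i) then '1' else '0')
          = (List.range w).map (fun i => if (m / 2).testBit (w - 1 - i) then '1' else '0')
            ++ [if m.testBit 0 then '1' else '0'] := by
        rw [List.range_succ, List.map_append]
        congr 1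
        · apply List.map_congr_left
          intro i hi
          have hi' : i < w := List.mem_range.mp hi
          have : w + 1 - 1 - i = (w - 1 - i) + 1 := by omega
          rw [this, Nat.testBit_succ]
        · simp
      rw [hrhs, ← ih hw (m / 2) hm2]
      match m with
      | 0 =>
        simp only [pvBits]
        have h1 : (w + 1 - 1) = (w - 1) + 1 := by omega
        simp [pvBits, h1, List.replicate_succ', List.append_assoc]
      | 1 =>
        have h1 : (w + 1 - 1) = (w - 1) + 1 := by omega
        simp [pvBits, h1, List.replicate_succ', List.append_assoc]
      | m + 2 =>
        rw [pvBits]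
        have hL : (pvBits ((m + 2) / 2)).length ≤ w := pvBits_len_le w _ hm2 hw
        have h1 : w + 1 - ((pvBits ((m + 2) / 2)).length + 1)
            = w - (pvBits ((m + 2) / 2)).length := by omega
        have h2 : Nat.digitChar ((m + 2) % 2) = if (m + 2).testBit 0 then '1' else '0' := by
          rcases Nat.mod_two_eq_zero_or_one (m + 2) with h | h <;>
            simp [Nat.testBit_zero, h, Nat.digitChar]
        simp only [List.length_append, List.length_cons, List.length_nil, h1, h2,
          ← List.append_assoc]

theorem pvCast_pow (w : Nat) : ((2 : Int) ^ w) = ((2 ^ w : Nat) : Int) := by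
  push_cast; ring

theorem pvBand_mask_nonneg (v : Int) (w : Nat) (hv : 0 ≤ v) :
    PySem.Int.band v ((2 : Int) ^ w - 1) = ((v.toNat % 2 ^ w : Nat) : Int) := by
  have h1 := Nat.one_le_two_pow (n := w)
  rw [PySem.Int.band_of_nonneg hv (by rw [pvCast_pow]; omega)]
  congr 1
  have h : ((2 : Int) ^ w - 1).toNat = 2 ^ w - 1 := by rw [pvCast_pow]; omega
  rw [h, Nat.and_two_pow_sub_one_eq_mod]

theorem pvBand_mask_neg (v : Int) (w : Nat) (hv : v < 0) :
    PySem.Int.band v ((2 : Int) ^ w - 1)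
      = ((2 ^ w - ((-v - 1).toNat % 2 ^ w + 1) : Nat) : Int) := by
  have h1 := Nat.one_le_two_pow (n := w)
  unfold PySem.Int.band
  rw [if_neg (by omega), if_pos (by rw [pvCast_pow]; omega)]
  have h : ((2 : Int) ^ w - 1).toNat = 2 ^ w - 1 := by rw [pvCast_pow]; omega
  rw [h, Nat.and_comm, Nat.and_two_pow_sub_one_eq_mod]
  have := Nat.mod_lt ((-v - 1).toNat) (y := 2 ^ w) (by omega)
  congr 1
  omega

theorem pvBand_pow_nonneg (v : Int) (j : Nat) (hv : 0 ≤ v) :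
    PySem.Int.band v ((2 : Int) ^ j) = ((v.toNat &&& 2 ^ j : Nat) : Int) := by
  have h1 := Nat.one_le_two_pow (n := j)
  rw [PySem.Int.band_of_nonneg hv (by rw [pvCast_pow]; omega),
    show ((2 : Int) ^ j).toNat = 2 ^ j from by rw [pvCast_pow]; omega]

theorem pvBand_pow_neg (v : Int) (j : Nat) (hv : v < 0) :
    PySem.Int.band v ((2 : Int) ^ j)
      = ((2 ^ j - (((-v - 1).toNat.testBit j).toNat * 2 ^ j) : Nat) : Int) := by
  have h1 := Nat.one_le_two_pow (n := j)
  unfold PySem.Int.band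
  rw [if_neg (by omega), if_pos (by rw [pvCast_pow]; omega)]
  have h : ((2 : Int) ^ j).toNat = 2 ^ j := by rw [pvCast_pow]; omega
  rw [h, Nat.and_comm, Nat.and_two_pow]

-- the masked value is the low w bits
theorem pvMask_lt (v : Int) (w : Nat) :
    (PySem.Int.band v ((2 : Int) ^ w - 1)).toNat < 2 ^ w := by
  have h1 := Nat.one_le_two_pow (n := w)
  by_cases hv : 0 ≤ v
  · rw [pvBand_mask_nonneg v w hv, Int.toNat_natCast]
    exact Nat.mod_lt _ (by omega)
  · rw [pvBand_mask_neg v w (by omega), Int.toNat_natCast]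
    omega

-- bit test of A equals a testBit of the masked value
theorem pvBand_testBit (v : Int) (w j : Nat) (hj : j < w) :
    (PySem.Int.band v ((2 : Int) ^ j) = 0
      ↔ (PySem.Int.band v ((2 : Int) ^ w - 1)).toNat.testBit j = false) := by
  have hpj := Nat.one_le_two_pow (n := j)
  have hpw := Nat.one_le_two_pow (n := w)
  by_cases hv : 0 ≤ v
  · rw [pvBand_pow_nonneg v j hv, pvBand_mask_nonneg v w hv, Int.toNat_natCast,
      Nat.testBit_mod_two_pow]
    rw [Int.natCast_eq_zero, Nat.and_two_pow]
    cases h : v.toNat.testBit j <;> simp [h, hj]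
  · rw [pvBand_pow_neg v j (by omega), pvBand_mask_neg v w (by omega), Int.toNat_natCast,
      Int.natCast_eq_zero]
    have hlt : (-v - 1).toNat % 2 ^ w < 2 ^ w := Nat.mod_lt _ (by omega)
    rw [Nat.testBit_two_pow_sub_succ hlt, Nat.testBit_mod_two_pow]
    cases h : (-v - 1).toNat.testBit j <;> simp [h, hj]

-- A's inner loop, as a counter recursion (the loop body ignores the range element)
def pvIterA (d : String) : Nat → List String × Int → List String × Int
  | 0, st => st
  | k + 1, st => pvIterA d k (pvBodyA d st.1 st.2, PySem.Int.floordiv st.2 2)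

theorem pvFoldl_iterA (d : String) (l : List Int) : ∀ (st : List String × Int),
    l.foldl (fun (st2 : List String × Int) _i =>
      (pvBodyA d st2.1 st2.2, PySem.Int.floordiv st2.2 2)) st = pvIterA d l.length st := by
  induction l with
  | nil => intro st; rfl
  | cons x xs ih => intro st; simp only [List.foldl_cons, List.length_cons, pvIterA]; exact ih _

theorem pvIterA_x (d : String) (hd : PySem.Int.ofStrBase? d 16 = none) (k : Nat) :
    ∀ rts bv, (pvIterA d k (rts, bv)).1 = rts ++ List.replicate k "x" := by
  induction k with
  | zero => intro rts bv; simp [pvIterA]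
  | succ k ih =>
    intro rts bv
    rw [pvIterA]
    show (pvIterA d k (pvBodyA d rts bv, _)).1 = _
    rw [ih]
    simp [pvBodyA, hd, List.replicate_succ]

theorem pvIterA_bits (d : String) (v : Int) (hd : PySem.Int.ofStrBase? d 16 = some v) (k : Nat) :
    ∀ j rts, k ≤ j + 1 →
      (pvIterA d k (rts, (2 : Int) ^ j)).1
        = rts ++ (List.range k).map
            (fun i => if PySem.Int.band v ((2 : Int) ^ (j - i)) = 0 then "0" else "1") := by
  induction k with
  | zero => intro j rts _; simp [pvIterA]
  | succ k ih =>
    intro j rts hk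
    rw [pvIterA]
    show (pvIterA d k (pvBodyA d rts ((2 : Int) ^ j), PySem.Int.floordiv ((2 : Int) ^ j) 2)).1 = _
    match j, hk with
    | 0, hk =>
      have hk0 : k = 0 := by omega
      subst hk0
      simp only [pvIterA, pvBodyA, hd, pow_zero]
      split_ifs with h <;> simp [h]
    | j + 1, _ =>
      have hdiv : PySem.Int.floordiv ((2 : Int) ^ (j + 1)) 2 = (2 : Int) ^ j := by
        rw [PySem.Int.floordiv_eq_iff_of_pos (by omega), pow_succ]
        have h0 : (0:Int) < 2 ^ j := by positivity
        constructor
        · linarith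
        · nlinarith
      rw [hdiv, ih j _ (by omega)]
      rw [List.range_succ_eq_map]
      simp only [List.map_cons, List.map_map, pvBodyA, hd]
      have hb : (fun i => if PySem.Int.band v ((2 : Int) ^ (j + 1 - i)) = 0 then "0" else "1") ∘
          Nat.succ = fun i => if PySem.Int.band v ((2 : Int) ^ (j - i)) = 0 then "0" else "1" := by
        funext i
        simp [Function.comp, Nat.succ_sub_succ]
      rw [hb]
      by_cases hz : PySem.Int.band v ((2 : Int) ^ (j + 1)) = 0 <;>
        simp [hz, List.append_assoc]

-- one field of A equals one field of B
theorem pvField_eq (bw : Int) (d : String) (rts : List String) :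
    ((PySem.List.pyRange 0 bw 1).foldl (fun (st2 : List String × Int) _i =>
        (pvBodyA d st2.1 st2.2, PySem.Int.floordiv st2.2 2)) (rts, (2:Int) ^ (bw - 1).toNat)).1
      = if bw ≤ 0 then rts else rts ++ pvFieldB bw d := by
  rw [pvFoldl_iterA, PySem.List.length_pyRange_one]
  simp only [sub_zero]
  by_cases hbw : bw ≤ 0
  · have : bw.toNat = 0 := by omega
    rw [this]
    simp [pvIterA, hbw]
  · rw [if_neg hbw]
    have hw : 0 < bw.toNat := by omega
    have hj : (bw - 1).toNat = bw.toNat - 1 := by omega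
    match hparse : PySem.Int.ofStrBase? d 16 with
    | none =>
      rw [pvIterA_x d hparse]
      simp only [pvFieldB, hparse]
    | some v =>
      rw [hj, pvIterA_bits d v hparse bw.toNat (bw.toNat - 1) rts (by omega)]
      simp only [pvFieldB, hparse]
      congr 1
      have hmask : ((1 : Int) <<< bw.toNat) - 1 = (2 : Int) ^ bw.toNat - 1 := by
        rw [Int.shiftLeft_eq, one_mul]
      rw [hmask]
      set m : Int := PySem.Int.band v ((2 : Int) ^ bw.toNat - 1) with hm
      have hm0 : 0 ≤ m := by
        rw [hm, PySem.Int.band_comm]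
        refine PySem.Int.band_nonneg_of_nonneg_left _ ?_
        have := Nat.one_le_two_pow (n := bw.toNat)
        rw [pvCast_pow]; omega
      have hdigs : PySem.Int.toBinChars m = pvBits m.toNat := by
        rw [PySem.Int.toBinChars, if_neg (by omega), pvToDigits_eq]
      rw [hdigs, pvBits_pad bw.toNat hw m.toNat (pvMask_lt v bw.toNat), List.map_map]
      apply List.map_congr_left
      intro i hi
      have hi' : i < bw.toNat := List.mem_range.mp hi
      have hlt : bw.toNat - 1 - i < bw.toNat := by omega
      have := pvBand_testBit v bw.toNat (bw.toNat - 1 - i) hlt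
      rw [← hm] at this
      by_cases hz : PySem.Int.band v ((2 : Int) ^ (bw.toNat - 1 - i)) = 0
      · have hf : m.toNat.testBit (bw.toNat - 1 - i) = false := this.mp hz
        simp [hz, hf, Function.comp]
      · have hf : m.toNat.testBit (bw.toNat - 1 - i) = true := by
          rcases Bool.eq_false_or_eq_true (m.toNat.testBit (bw.toNat - 1 - i)) with h | h
          · exact h
          · exact absurd (this.mpr h) hz
        simp [hz, hf, Function.comp]

-- joint loop lemma: A's fold over the header names = B's fold over as many leading data tokens
theorem pvLoops_eq (hs : List String) :
    ∀ (bws : List Int) (ds rts : List String), hs.length ≤ bws.length → hs.length ≤ ds.length →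
      (hs.foldl (fun (st : List Int × List String × List String) _bus_name =>
        match st with
        | (bw :: bws', d :: ds', rts) =>
          let bit_val : Int := (2:Int) ^ (bw - 1).toNat
          let inner := (PySem.List.pyRange 0 bw 1).foldl (fun (st2 : List String × Int) _i =>
              (pvBodyA d st2.1 st2.2, PySem.Int.floordiv st2.2 2)) (rts, bit_val)
          (bws', ds', inner.1)
        | (bws, ds, rts) => (bws, ds, rts)) (bws, ds, rts)).2.2
      = ((ds.take hs.length).foldl (fun (st : List String × List Int) data =>
          match st with
          | (rts, w :: bws') => if w ≤ 0 then (rts, bws') else (rts ++ pvFieldB w data, bws')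
          | (rts, []) => (rts, [])) (rts, bws)).1 := by
  induction hs with
  | nil => intro bws ds rts _ _; rfl
  | cons h hs ih =>
    intro bws ds rts hb hd
    match bws, ds with
    | bw :: bws', d :: ds' =>
      simp only [List.length_cons, List.foldl_cons, List.take_succ_cons]
      rw [ih bws' ds' _ (by simpa using hb) (by simpa using hd)]
      congr 1
      have hf := pvField_eq bw d rts
      by_cases hbw : bw ≤ 0
      · rw [if_pos hbw] at hf
        simp only [hf, if_pos hbw]
      · rw [if_neg hbw] at hf
        simp only [hf, if_neg hbw]
    | [], _ => simp at hb
    | _ :: _, [] => simp at hd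

-- ===== VERDICT (by name: the statement is the Claim_ definition above) =====
theorem get_bit_value_spec : Claim_equal_get_bit_value := by
  intro data_line header_line bus _ hpre
  obtain ⟨hb, hd⟩ := hpre
  unfold Spec_get_bit_value
  simp only [get_bit_value, get_bit_value_alt]
  rw [PySem.List.slice_zero_start, PySem.List.slice_to_neg_one,
    PySem.List.slice_to _ (le_max_right _ 0)]
  have hk : (max (((PySem.Str.split₀ header_line).length : Int) - 1) 0).toNat
      = (PySem.Str.split₀ header_line).length - 1 := by omega
  have hlen : (PySem.Str.split₀ header_line).dropLast.length
      = (PySem.Str.split₀ header_line).length - 1 := List.length_dropLast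
  rw [hk, ← hlen]
  exact pvLoops_eq (PySem.Str.split₀ header_line).dropLast bus (PySem.Str.split₀ data_line) []
    (by omega) (by omega)
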